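-- pv_equiv track=rewrite | github.com/gksgpals/make_yga | slide_formatter.py | normalize_content_lines
-- ===== SOURCE A (Python) =====
-- from typing import Any, List, Tuple
--
-- def normalize_content_lines(lines: List[str]) -> List[str]:
--     out: List[str] = []
--     for line in lines:
--         stripped = line.rstrip()
--         if not stripped:
--             if out and out[-1] != "":
--                 out.append("")
--             continue
--         out.append(stripped)
--     while out and out[-1] == "":
--         out.pop()
--     return out
-- ===== SOURCE B (Python) =====
-- from typing import List
--
-- def normalize_content_lines(lines: List[str]) -> List[str]:
--     stripped = [l.rstrip() for l in lines]
--     n = len(stripped)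
--     out: List[str] = []
--     i = 0
--     # skip the leading blank run
--     while i < n and stripped[i] == '':
--         i += 1
--     while i < n:
--         if stripped[i] == '':
--             # scan a whole blank run; emit a single '' only if content follows
--             j = i
--             while j < n and stripped[j] == '':
--                 j += 1
--             if j < n:
--                 out.append('')
--             i = j
--         else:
--             out.append(stripped[i])
--             i += 1
--     return out
-- ===== Notes on version B (the rewrite author's own statement) =====
-- stated objective: alternative
-- what changed: B scans whole blank runs with a lookahead index (emitting a single '' only when content follows), instead of A's per-line fold that inspects out[-1] plus a final trailing-pop loop.
import Mathlib
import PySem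

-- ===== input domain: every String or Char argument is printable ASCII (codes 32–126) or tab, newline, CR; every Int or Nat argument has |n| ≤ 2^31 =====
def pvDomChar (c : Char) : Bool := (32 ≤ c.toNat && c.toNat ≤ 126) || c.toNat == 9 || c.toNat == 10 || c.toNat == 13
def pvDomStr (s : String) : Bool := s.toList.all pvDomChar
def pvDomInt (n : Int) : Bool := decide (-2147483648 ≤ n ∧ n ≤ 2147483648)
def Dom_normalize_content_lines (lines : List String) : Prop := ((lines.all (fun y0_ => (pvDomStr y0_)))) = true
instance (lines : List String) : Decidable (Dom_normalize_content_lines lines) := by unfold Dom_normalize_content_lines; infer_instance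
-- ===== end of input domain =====

-- B replaces A's per-line fold (which inspects out[-1] and pops trailing blanks at the end)
-- by a run-scanning pass with lookahead; equal return value, no speed claim (objective: alternative).

-- ===== PORT A =====
-- one iteration of A's for-loop body
def pvStepA (out : List String) (stripped : String) : List String :=
  if stripped = "" then
    (if out ≠ [] ∧ out.getLast? ≠ some "" then out ++ [""] else out)
  else out ++ [stripped]

-- A's final 'while out and out[-1] == "": out.pop()'
def pvTrimA (out : List String) : List String :=
  if out ≠ [] ∧ out.getLast? = some "" then pvTrimA out.dropLast else out
termination_by out.length
decreasing_by
  rename_i h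
  have hne := h.1
  have : out.dropLast.length < out.length := by
    cases out with
    | nil => exact absurd rfl hne
    | cons a t => simp [List.length_dropLast]
  exact this

def normalize_content_lines (lines : List String) : List String :=
  pvTrimA (lines.foldl (fun out line => pvStepA out (PySem.Str.rstrip line)) [])

-- ===== PORT B =====
-- B's main loop: run-scan with lookahead (the blank branch scans the whole run,
-- emitting a single "" only if content follows)
def pvAltGo : List String → List String
  | [] => []
  | x :: xs =>
    if x = "" then
      (let rest := xs.dropWhile (· == "")
       if rest ≠ [] then "" :: pvAltGo rest else [])
    else x :: pvAltGo xs
termination_by xs => xs.length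
decreasing_by
  · exact Nat.lt_succ_of_le (List.length_dropWhile_le _ _)
  · exact Nat.lt_succ_self _

def normalize_content_lines_alt (lines : List String) : List String :=
  pvAltGo ((lines.map PySem.Str.rstrip).dropWhile (· == ""))

-- ===== PRECONDITION & SPEC =====
def Spec_normalize_content_lines (lines : List String) (out : List String) : Prop := out = normalize_content_lines_alt lines
instance (lines : List String) (out : List String) : Decidable (Spec_normalize_content_lines lines out) := by unfold Spec_normalize_content_lines; infer_instance

-- ===== CLAIM (what is proved, stated in full; the proofs are below) =====
def Claim_equal_normalize_content_lines : Prop := ∀ (lines : List String), Dom_normalize_content_lines lines → Spec_normalize_content_lines lines (normalize_content_lines lines)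

-- ===== LEMMAS AND PROOFS =====

lemma pvTrimA_nil : pvTrimA [] = [] := by
  unfold pvTrimA; simp

lemma pvTrimA_of_last {out : List String} (h : out.getLast? ≠ some "") :
    pvTrimA out = out := by
  unfold pvTrimA
  simp only [ne_eq, ite_eq_right_iff, and_imp]
  intro _ hc; exact absurd hc h

lemma pvTrimA_append_blank {out : List String} {s : String}
    (h : out.getLast? = some s) (hs : s ≠ "") :
    pvTrimA (out ++ [""]) = out := by
  unfold pvTrimA
  have hne : out ++ [""] ≠ [] := by simp
  simp only [List.getLast?_append, List.getLast?_singleton, hne, ne_eq,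
    not_false_iff, true_and]
  rw [List.dropLast_concat]
  exact pvTrimA_of_last (by rw [h]; simp [hs])

-- coupled invariants for A's fold, by strong induction on the remaining list's length:
-- P: starting from an out whose last line is non-blank, A's trimmed fold appends exactly pvAltGo xs;
-- Q: the same one step after a blank was appended.
lemma pv_main :
    ∀ n (xs : List String), xs.length ≤ n →
      (∀ (out : List String) (s : String), out.getLast? = some s → s ≠ "" →
          pvTrimA (List.foldl pvStepA out xs) = out ++ pvAltGo xs)
      ∧
      (∀ (out : List String) (s : String), out.getLast? = some s → s ≠ "" →
          pvTrimA (List.foldl pvStepA (out ++ [""]) xs) =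
            out ++ (if xs.dropWhile (· == "") = [] then []
                    else "" :: pvAltGo (xs.dropWhile (· == "")))) := by
  intro n
  induction n with
  | zero =>
    intro xs hx
    have : xs = [] := List.length_eq_zero_iff.mp (Nat.le_zero.mp hx)
    subst this
    constructor
    · intro out s h hs
      simp only [List.foldl_nil, pvAltGo, List.append_nil]
      exact pvTrimA_of_last (by rw [h]; simp [hs])
    · intro out s h hs
      simp only [List.foldl_nil, List.dropWhile_nil]
      simpa using pvTrimA_append_blank h hs
  | succ n ih =>
    intro xs hx
    cases xs with
    | nil =>
      constructor
      · intro out s h hs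
        simp only [List.foldl_nil, pvAltGo, List.append_nil]
        exact pvTrimA_of_last (by rw [h]; simp [hs])
      · intro out s h hs
        simp only [List.foldl_nil, List.dropWhile_nil]
        simpa using pvTrimA_append_blank h hs
    | cons x t =>
      have ht : t.length ≤ n := by simpa using Nat.lt_succ_iff.mp (by simpa using Nat.lt_of_lt_of_le (by simp) hx)
      constructor
      · intro out s h hs
        by_cases hxb : x = ""
        · subst hxb
          have hne : out ≠ [] := by
            intro hc; rw [hc] at h; simp at h
          have hlast : out.getLast? ≠ some "" := by rw [h]; simp [hs]
          have hstep : pvStepA out "" = out ++ [""] := by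
            simp [pvStepA, hne, hlast]
          rw [List.foldl_cons, hstep, (ih t ht).2 out s h hs]
          simp only [pvAltGo]
          by_cases hrest : t.dropWhile (· == "") = []
          · simp [hrest]
          · simp [hrest]
        · have hstep : pvStepA out x = out ++ [x] := by simp [pvStepA, hxb]
          have hlast' : (out ++ [x]).getLast? = some x := by simp
          rw [List.foldl_cons, hstep, ((ih t ht).1 (out ++ [x]) x hlast' hxb)]
          simp [pvAltGo, hxb]
      · intro out s h hs
        by_cases hxb : x = ""
        · subst hxb
          have hlast : (out ++ [""]).getLast? = some "" := by simp
          have hstep : pvStepA (out ++ [""]) "" = out ++ [""] := by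
            simp [pvStepA, hlast]
          rw [List.foldl_cons, hstep, (ih t ht).2 out s h hs]
          simp
        · have hstep : pvStepA (out ++ [""]) x = out ++ [""] ++ [x] := by
            simp [pvStepA, hxb]
          have hlast' : (out ++ [""] ++ [x]).getLast? = some x := by simp
          rw [List.foldl_cons, hstep, ((ih t ht).1 (out ++ [""] ++ [x]) x hlast' hxb)]
          have hdw : (x :: t).dropWhile (· == "") = x :: t := by
            simp [hxb]
          rw [hdw]
          simp [pvAltGo, hxb]

lemma pv_zero : ∀ (xs : List String),
    pvTrimA (List.foldl pvStepA [] xs) = pvAltGo (xs.dropWhile (· == "")) := by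
  intro xs
  induction xs with
  | nil => simp [pvTrimA_nil, pvAltGo]
  | cons x t iht =>
    by_cases hxb : x = ""
    · subst hxb
      have hstep : pvStepA ([] : List String) "" = [] := by simp [pvStepA]
      rw [List.foldl_cons, hstep, iht]
      simp
    · have hstep : pvStepA ([] : List String) x = [x] := by simp [pvStepA, hxb]
      have hdw : (x :: t).dropWhile (· == "") = x :: t := by
        simp [hxb]
      rw [List.foldl_cons, hstep,
        ((pv_main t.length t le_rfl).1 [x] x (by simp) hxb), hdw]
      simp [pvAltGo, hxb]

-- ===== VERDICT (by name: the statement is the Claim_ definition above) =====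
theorem normalize_content_lines_spec : Claim_equal_normalize_content_lines := by
  intro lines _
  unfold Spec_normalize_content_lines normalize_content_lines normalize_content_lines_alt
  rw [← List.foldl_map (f := PySem.Str.rstrip) (g := pvStepA)]
  exact pv_zero _
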